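-- pv_equiv track=rewrite | github.com/sam-brk/codility-examples | rps.py | solution
-- ===== SOURCE A (Python) =====
-- def solution(G):
--     maximum_score = total_points = 0
--     for francos_turn in ['R','P','S']:
--         for giovannis_turn in G:
--             total_points += rps(francos_turn, giovannis_turn)
--         maximum_score=max(maximum_score, total_points)
--         total_points=0
--     return maximum_score
--
-- def rps(franco, giovanni):
--     if(franco == 'R'):
--         if(giovanni == 'R'):
--             return 1
--         if(giovanni == 'S'):
--             return 2
--         if(giovanni == 'P'):
--             return 0
--     if(franco == 'S'):
--         if(giovanni == 'R'):
--             return 0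
--         if(giovanni == 'S'):
--             return 1
--         if(giovanni == 'P'):
--             return 2
--     if(franco == 'P'):
--         if(giovanni == 'R'):
--             return 2
--         if(giovanni == 'S'):
--             return 0
--         if(giovanni == 'P'):
--             return 1
-- ===== SOURCE B (Python) =====
-- def solution(G):
--     nR = nP = nS = 0
--     for g in G:
--         if g == 'R':
--             nR += 1
--         elif g == 'P':
--             nP += 1
--         elif g == 'S':
--             nS += 1
--         else:
--             raise ValueError("invalid move: %r" % (g,))
--     return max(nR + 2 * nS, 2 * nR + nP, nS + 2 * nP)
-- ===== Notes on version B (the rewrite author's own statement) =====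
-- stated objective: simpler
-- what changed: Replaces three full passes over G (one simulated match per Franco move via the rps branch table) by a single counting pass and three closed-form scores nR+2*nS, 2*nR+nP, nS+2*nP whose max is returned; B validates moves explicitly (ValueError) where A fails with a TypeError from None+int.
import Mathlib
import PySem

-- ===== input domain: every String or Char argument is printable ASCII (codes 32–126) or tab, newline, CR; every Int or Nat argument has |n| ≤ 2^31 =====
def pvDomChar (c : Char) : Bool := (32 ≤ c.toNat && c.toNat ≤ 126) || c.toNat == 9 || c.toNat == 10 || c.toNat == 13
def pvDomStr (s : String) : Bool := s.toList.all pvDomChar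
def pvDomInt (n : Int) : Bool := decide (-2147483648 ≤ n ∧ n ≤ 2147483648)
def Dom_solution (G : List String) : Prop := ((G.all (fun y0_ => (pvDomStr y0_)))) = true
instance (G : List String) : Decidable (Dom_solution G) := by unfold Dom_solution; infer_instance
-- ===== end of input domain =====

-- B replaces A's three passes over G by one counting pass plus closed-form scores: simpler and one pass.


-- ===== PORT A =====
-- rps: Python returns None when no branch fires (→ TypeError in solution); here Option Int,
-- the `none` case is excluded by Pre_solution.
def rpsA (franco giovanni : String) : Option Int :=
  if franco = "R" then
    if giovanni = "R" then some 1
    else if giovanni = "S" then some 2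
    else if giovanni = "P" then some 0
    else none
  else if franco = "S" then
    if giovanni = "R" then some 0
    else if giovanni = "S" then some 1
    else if giovanni = "P" then some 2
    else none
  else if franco = "P" then
    if giovanni = "R" then some 2
    else if giovanni = "S" then some 0
    else if giovanni = "P" then some 1
    else none
  else none

-- total_points += rps(...): `.getD 0` stands for the addition that in Python raises on None;
-- those inputs are outside Pre_solution.
def solution (G : List String) : Int :=
  (["R", "P", "S"].foldl
    (fun (st : Int × Int) francos_turn =>
      let total_points := G.foldl (fun t giovannis_turn => t + (rpsA francos_turn giovannis_turn).getD 0) st.2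
      (max st.1 total_points, 0))
    (0, 0)).1

-- ===== PORT B =====
-- the final `else c` branch is Source B's `raise ValueError` (invalid move, excluded by Pre_solution)
def solution_alt (G : List String) : Int :=
  let c := G.foldl
    (fun (c : Int × Int × Int) g =>
      if g = "R" then (c.1 + 1, c.2.1, c.2.2)
      else if g = "P" then (c.1, c.2.1 + 1, c.2.2)
      else if g = "S" then (c.1, c.2.1, c.2.2 + 1)
      else c)
    (0, 0, 0)
  max (max (c.1 + 2 * c.2.2) (2 * c.1 + c.2.1)) (c.2.2 + 2 * c.2.1)

-- ===== PRECONDITION & SPEC =====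
-- Pre_: exactly the inputs where Python A returns (any other element makes rps return None
-- and A raise TypeError on the += ).
def Pre_solution (G : List String) : Prop := ∀ g ∈ G, g = "R" ∨ g = "P" ∨ g = "S"
instance (G : List String) : Decidable (Pre_solution G) := by unfold Pre_solution; infer_instance
def pvWitness_solution : List String := ["R", "P", "S", "R"]

def Spec_solution (G : List String) (out : Int) : Prop := out = solution_alt G
instance (G : List String) (out : Int) : Decidable (Spec_solution G out) := by unfold Spec_solution; infer_instance

-- ===== CLAIM (what is proved, stated in full; the proofs are below) =====
def Claim_equal_solution : Prop := ∀ (G : List String), Dom_solution G → Pre_solution G → Spec_solution G (solution G)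

-- ===== LEMMAS AND PROOFS =====

-- scalar counts of "R"/"P"/"S" in G
def cR : List String → Int
  | [] => 0
  | g :: gs => (if g = "R" then 1 else 0) + cR gs
def cP : List String → Int
  | [] => 0
  | g :: gs => (if g = "P" then 1 else 0) + cP gs
def cS : List String → Int
  | [] => 0
  | g :: gs => (if g = "S" then 1 else 0) + cS gs

theorem cR_nonneg (G : List String) : 0 ≤ cR G := by
  induction G with
  | nil => simp [cR]
  | cons g gs ih => simp only [cR]; split <;> omega

theorem cP_nonneg (G : List String) : 0 ≤ cP G := by
  induction G with
  | nil => simp [cP]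
  | cons g gs ih => simp only [cP]; split <;> omega

theorem cS_nonneg (G : List String) : 0 ≤ cS G := by
  induction G with
  | nil => simp [cS]
  | cons g gs ih => simp only [cS]; split <;> omega

-- B's counting fold computes the three counts
theorem bfold_eq (G : List String) : ∀ (a b c : Int),
    G.foldl
      (fun (c : Int × Int × Int) g =>
        if g = "R" then (c.1 + 1, c.2.1, c.2.2)
        else if g = "P" then (c.1, c.2.1 + 1, c.2.2)
        else if g = "S" then (c.1, c.2.1, c.2.2 + 1)
        else c)
      (a, b, c) = (a + cR G, b + cP G, c + cS G) := by
  induction G with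
  | nil => intro a b c; simp [cR, cP, cS]
  | cons g gs ih =>
    intro a b c
    simp only [List.foldl_cons]
    split_ifs with h1 h2 h3 <;> rw [ih] <;> simp_all [cR, cP, cS] <;> omega

-- A's inner fold, for each Franco move, is affine in the counts (valid inputs only)
theorem afoldR (G : List String) (h : Pre_solution G) : ∀ (t : Int),
    G.foldl (fun t g => t + (rpsA "R" g).getD 0) t = t + cR G + 2 * cS G := by
  induction G with
  | nil => intro t; simp [cR, cS]
  | cons g gs ih =>
    intro t
    have hg := h g (List.mem_cons_self ..)
    have hgs : Pre_solution gs := fun x hx => h x (List.mem_cons_of_mem _ hx)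
    rcases hg with hg | hg | hg <;> subst hg <;>
      simp only [List.foldl_cons] <;> rw [ih hgs] <;> simp [rpsA, cR, cS] <;> omega

theorem afoldP (G : List String) (h : Pre_solution G) : ∀ (t : Int),
    G.foldl (fun t g => t + (rpsA "P" g).getD 0) t = t + 2 * cR G + cP G := by
  induction G with
  | nil => intro t; simp [cR, cP]
  | cons g gs ih =>
    intro t
    have hg := h g (List.mem_cons_self ..)
    have hgs : Pre_solution gs := fun x hx => h x (List.mem_cons_of_mem _ hx)
    rcases hg with hg | hg | hg <;> subst hg <;>
      simp only [List.foldl_cons] <;> rw [ih hgs] <;> simp [rpsA, cR, cP] <;> omega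

theorem afoldS (G : List String) (h : Pre_solution G) : ∀ (t : Int),
    G.foldl (fun t g => t + (rpsA "S" g).getD 0) t = t + cS G + 2 * cP G := by
  induction G with
  | nil => intro t; simp [cS, cP]
  | cons g gs ih =>
    intro t
    have hg := h g (List.mem_cons_self ..)
    have hgs : Pre_solution gs := fun x hx => h x (List.mem_cons_of_mem _ hx)
    rcases hg with hg | hg | hg <;> subst hg <;>
      simp only [List.foldl_cons] <;> rw [ih hgs] <;> simp [rpsA, cS, cP] <;> omega

-- ===== VERDICT (by name: the statement is the Claim_ definition above) =====
theorem solution_spec : Claim_equal_solution := by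
  intro G _ hpre
  unfold Spec_solution solution solution_alt
  simp only [List.foldl_cons, List.foldl_nil]
  rw [bfold_eq G 0 0 0, afoldR G hpre, afoldP G hpre, afoldS G hpre]
  have h1 := cR_nonneg G
  have h2 := cP_nonneg G
  have h3 := cS_nonneg G
  simp only []
  omega
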